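-- pv_equiv track=rewrite | github.com/Hohnik/hawplan | main.py | _guess_token_field
-- ===== SOURCE A (Python) =====
-- _TOKEN_KEYS    = {
--     "j_tokennumber", "tokennumber", "token",
--     "otp", "totp", "mfa", "passcode", "code", "pin",
--     "_shib_idp_mfa_otp", "authn_code", "response",
-- }
--
-- _BORING_FIELDS = {
--     "csrf_token", "_eventid_proceed", "shib_idp_ls_supported",
--     "execution", "samlrequest", "relaystate",
-- }
--
-- def _find_field(fields: dict, key_set: set[str]) -> str | None:
--     return next((k for k in fields if k.lower() in key_set), None)
--
-- def _guess_token_field(fields: dict) -> str | None: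
--     """Return the most likely token field name."""
--     # 1. Exact known name
--     known = _find_field(fields, _TOKEN_KEYS)
--     if known:
--         return known
--     # 2. Fallback: first field that isn't boring
--     for k in fields:
--         if k.lower() not in _BORING_FIELDS and not k.lower().startswith("shib_idp_ls_"):
--             return k
--     return None
-- ===== SOURCE B (Python) =====
-- _TOKEN_KEYS    = {
--     "j_tokennumber", "tokennumber", "token",
--     "otp", "totp", "mfa", "passcode", "code", "pin",
--     "_shib_idp_mfa_otp", "authn_code", "response",
-- }
--
-- _BORING_FIELDS = {
--     "csrf_token", "_eventid_proceed", "shib_idp_ls_supported",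
--     "execution", "samlrequest", "relaystate",
-- }
--
-- def _guess_token_field(fields):
--     """Return the most likely token field name (single pass)."""
--     fallback = None
--     for k in fields:
--         lk = k.lower()
--         if lk in _TOKEN_KEYS:
--             return k
--         if fallback is None and lk not in _BORING_FIELDS and not lk.startswith("shib_idp_ls_"):
--             fallback = k
--     return fallback
-- ===== Notes on version B (the rewrite author's own statement) =====
-- stated objective: simpler
-- what changed: Replaces A's two sequential scans (token scan via a helper generator, then a fallback scan) with one loop that returns the first token match immediately and records the first non-boring key as a fallback emitted only after the full scan.
import Mathlib
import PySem

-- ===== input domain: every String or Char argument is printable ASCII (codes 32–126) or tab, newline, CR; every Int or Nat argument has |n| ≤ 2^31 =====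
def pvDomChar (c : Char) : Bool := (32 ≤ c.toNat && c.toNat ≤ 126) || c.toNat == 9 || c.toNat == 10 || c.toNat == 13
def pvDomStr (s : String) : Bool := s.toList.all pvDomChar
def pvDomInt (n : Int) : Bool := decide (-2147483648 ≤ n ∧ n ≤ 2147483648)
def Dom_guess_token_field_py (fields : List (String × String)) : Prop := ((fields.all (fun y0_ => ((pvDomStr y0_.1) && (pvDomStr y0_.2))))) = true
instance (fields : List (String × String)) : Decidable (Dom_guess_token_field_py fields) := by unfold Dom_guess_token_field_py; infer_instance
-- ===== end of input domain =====

-- B is a single-pass rewrite of A's two scans; same O(n) cost, simpler control flow.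

-- module constants (Python sets of string literals; membership only)
def pvTokenKeys : PySem.Set String := PySem.Set.ofList
  ["j_tokennumber", "tokennumber", "token",
   "otp", "totp", "mfa", "passcode", "code", "pin",
   "_shib_idp_mfa_otp", "authn_code", "response"]

def pvBoringFields : PySem.Set String := PySem.Set.ofList
  ["csrf_token", "_eventid_proceed", "shib_idp_ls_supported",
   "execution", "samlrequest", "relaystate"]

-- ===== PORT A =====
-- _find_field: first key whose lower() is in the key set
def pvFindField : List String → PySem.Set String → Option String
  | [], _ => none
  | k :: rest, ks => if PySem.Set.contains ks (PySem.Str.lower k) then some k else pvFindField rest ks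

-- step 2 of A: first key that is not boring
def pvFallbackLoop : List String → Option String
  | [] => none
  | k :: rest =>
    if PySem.Set.contains pvBoringFields (PySem.Str.lower k) = false ∧
       PySem.Str.startswith (PySem.Str.lower k) "shib_idp_ls_" = false
    then some k else pvFallbackLoop rest

def guess_token_field_py (fields : List (String × String)) : Option String :=
  match pvFindField (fields.map Prod.fst) pvTokenKeys with
  | some known => if known ≠ "" then some known else pvFallbackLoop (fields.map Prod.fst)  -- Python truthiness of `known`
  | none => pvFallbackLoop (fields.map Prod.fst)

-- ===== PORT B =====
-- single pass: return first token match at once; record first non-boring key as fallback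
def pvAltLoop : List String → Option String → Option String
  | [], fb => fb
  | k :: rest, fb =>
    let lk := PySem.Str.lower k
    if PySem.Set.contains pvTokenKeys lk then some k
    else
      let fb' := if fb = none ∧ PySem.Set.contains pvBoringFields lk = false ∧
                    PySem.Str.startswith lk "shib_idp_ls_" = false
                 then some k else fb
      pvAltLoop rest fb'

def guess_token_field_py_alt (fields : List (String × String)) : Option String :=
  pvAltLoop (fields.map Prod.fst) none

-- ===== PRECONDITION & SPEC =====
def Spec_guess_token_field_py (fields : List (String × String)) (out : Option String) : Prop := out = guess_token_field_py_alt fields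
instance (fields : List (String × String)) (out : Option String) : Decidable (Spec_guess_token_field_py fields out) := by unfold Spec_guess_token_field_py; infer_instance

-- ===== CLAIM (what is proved, stated in full; the proofs are below) =====
def Claim_equal_guess_token_field_py : Prop := ∀ (fields : List (String × String)), Dom_guess_token_field_py fields → Spec_guess_token_field_py fields (guess_token_field_py fields)

-- ===== LEMMAS AND PROOFS =====

-- a key found by the token scan has its lowercase form in the set
theorem pvFindField_mem {ks : List String} {t : String} (h : pvFindField ks pvTokenKeys = some t) :
    PySem.Set.contains pvTokenKeys (PySem.Str.lower t) = true := by
  induction ks with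
  | nil => simp [pvFindField] at h
  | cons k rest ih =>
    by_cases hc : PySem.Str.lower k ∈ pvTokenKeys
    · simp [pvFindField, hc] at h; subst h; simpa using hc
    · simp [pvFindField, hc] at h; exact ih h

theorem pvFindField_ne_empty {ks : List String} {t : String} (h : pvFindField ks pvTokenKeys = some t) :
    t ≠ "" := by
  intro he
  have hm := pvFindField_mem h
  rw [he] at hm
  exact absurd hm (by decide)

-- the single-pass loop equals: token scan first, then the pending fallback, then the fallback scan
theorem pvAltLoop_eq (ks : List String) : ∀ fb : Option String,
    pvAltLoop ks fb =
      match pvFindField ks pvTokenKeys with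
      | some t => some t
      | none => match fb with
                | some v => some v
                | none => pvFallbackLoop ks := by
  induction ks with
  | nil => intro fb; cases fb <;> rfl
  | cons k rest ih =>
    intro fb
    by_cases htok : PySem.Str.lower k ∈ pvTokenKeys
    · simp [pvAltLoop, pvFindField, htok]
    · cases fb with
      | some v =>
        simp [pvAltLoop, pvFindField, htok, ih]
      | none =>
        simp [pvAltLoop, pvFindField, pvFallbackLoop, htok, ih]
        cases hf : pvFindField rest pvTokenKeys <;> simp
        split_ifs <;> rfl

-- ===== VERDICT (by name: the statement is the Claim_ definition above) =====
theorem guess_token_field_py_spec : Claim_equal_guess_token_field_py := by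
  intro fields _
  unfold Spec_guess_token_field_py guess_token_field_py guess_token_field_py_alt
  rw [pvAltLoop_eq]
  cases h : pvFindField (fields.map Prod.fst) pvTokenKeys with
  | none => rfl
  | some t => simp [pvFindField_ne_empty h]
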